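-- pv_equiv track=rewrite | github.com/dhanya807/table-extractor | extractor/digital.py | _detect_row_relationships
-- ===== SOURCE A (Python) =====
-- from typing import Dict, List
--
-- def _detect_row_relationships(headers: List[str], rows: List[List[str]]) -> List[List[List[str]]]:
--     """Automatically detect how rows are related and group them intelligently."""
--
--     if not rows:
--         return []
--
--     # Analyze row patterns to understand relationships
--     def analyze_row_pattern(row: List[str]) -> dict:
--         """Analyze a row to understand its structure and content."""
--         non_empty = [i for i, c in enumerate(row) if c.strip()]
--         content_types = []
--
--         for i, cell in enumerate(row):
--             if not cell.strip():
--                 continue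
--             cell_lower = cell.lower()
--
--             # Detect content types
--             if any(char.isdigit() for char in cell):
--                 if any(char == '.' for char in cell):
--                     content_types.append(('number', i))
--                 else:
--                     content_types.append(('integer', i))
--             elif len(cell) <= 20 and any(char.isupper() for char in cell):
--                 content_types.append(('code', i))
--             elif any(phrase in cell_lower for phrase in ['origin', 'country', 'commodity', 'export', 'cpc']):
--                 content_types.append(('metadata', i))
--             else:
--                 content_types.append(('text', i))
--
--         return {
--             'non_empty_count': len(non_empty),
--             'content_types': content_types,
--             'has_numbers': any(t[0] in ['number', 'integer'] for t in content_types),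
--             'has_codes': any(t[0] == 'code' for t in content_types),
--             'has_metadata': any(t[0] == 'metadata' for t in content_types)
--         }
--
--     # Group rows by similarity
--     row_groups = []
--     current_group = []
--
--     for row in rows:
--         pattern = analyze_row_pattern(row)
--
--         # Start new group if this row looks like a main data row
--         if (pattern['has_numbers'] and pattern['non_empty_count'] >= 3) or \
--            (pattern['has_codes'] and pattern['non_empty_count'] >= 2):
--
--             if current_group:
--                 row_groups.append(current_group)
--             current_group = [row]
--         else:
--             # This looks like continuation/supplementary data
--             if current_group:
--                 current_group.append(row)
--             else:
--                 # Start a new group if we don't have one yet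
--                 current_group = [row]
--
--     # Add the last group
--     if current_group:
--         row_groups.append(current_group)
--
--     return row_groups
-- ===== SOURCE B (Python) =====
-- from typing import List
--
-- def _detect_row_relationships(headers: List[str], rows: List[List[str]]) -> List[List[List[str]]]:
--     """Group rows: a 'main' row opens a group; following non-main rows belong to it."""
--
--     def _is_main(row: List[str]) -> bool:
--         cells = [c for c in row if c.strip()]
--         if len(cells) >= 3 and any(any(ch.isdigit() for ch in c) for c in cells):
--             return True
--         return len(cells) >= 2 and any(
--             not any(ch.isdigit() for ch in c) and len(c) <= 20 and any(ch.isupper() for ch in c)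
--             for c in cells)
--
--     def _group(rs: List[List[str]]) -> List[List[List[str]]]:
--         if not rs:
--             return []
--         k = 1
--         while k < len(rs) and not _is_main(rs[k]):
--             k += 1
--         return [rs[:k]] + _group(rs[k:])
--
--     return _group(rows)
-- ===== Notes on version B (the rewrite author's own statement) =====
-- stated objective: simpler
-- what changed: Replaced the per-row pattern-dict analysis (content-type tagging with unused metadata/text tags and indices) plus the row_groups/current_group accumulator loop with a boolean is_main predicate and a recursive span grouping: each group is the first row (or a main row) followed by the run of non-main rows before the next main row.
import Mathlib
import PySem

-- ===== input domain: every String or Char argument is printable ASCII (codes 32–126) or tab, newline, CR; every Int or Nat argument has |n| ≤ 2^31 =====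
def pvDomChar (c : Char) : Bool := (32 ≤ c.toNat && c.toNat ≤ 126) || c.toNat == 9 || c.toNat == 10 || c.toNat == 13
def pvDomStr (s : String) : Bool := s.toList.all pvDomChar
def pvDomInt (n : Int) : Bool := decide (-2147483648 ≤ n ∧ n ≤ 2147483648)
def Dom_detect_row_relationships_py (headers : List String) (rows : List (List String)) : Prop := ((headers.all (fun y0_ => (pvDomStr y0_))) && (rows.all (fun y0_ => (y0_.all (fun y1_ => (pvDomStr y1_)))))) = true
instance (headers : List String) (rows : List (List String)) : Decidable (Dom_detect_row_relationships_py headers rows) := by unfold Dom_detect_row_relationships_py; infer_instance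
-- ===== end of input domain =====

-- B replaces A's per-row pattern dict (content-type tagging) + groups/current-group
-- accumulator loop by a boolean is-main predicate and a recursive span grouping;
-- objective: simpler, same asymptotic cost.

-- ===== PORT A =====
structure RowPattern where
  non_empty_count : Nat
  content_types : List (String × Int)
  has_numbers : Bool
  has_codes : Bool
  has_metadata : Bool
deriving Repr, DecidableEq

-- the body of analyze_row_pattern's content-type loop, one enumerated (i, cell) step
def ctStep (acc : List (String × Int)) : Int × String → List (String × Int)
  | (i, cell) =>
    if PySem.Str.strip cell == "" then acc
    else
      if cell.toList.any PySem.Chars.isdigit then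
        if cell.toList.any (fun ch => ch == '.') then acc ++ [("number", i)]
        else acc ++ [("integer", i)]
      else if decide (PySem.Str.len cell ≤ 20) && cell.toList.any PySem.Chars.isupper then
        acc ++ [("code", i)]
      else if (["origin", "country", "commodity", "export", "cpc"] : List String).any
          (fun phrase => PySem.Str.isIn phrase (PySem.Str.lower cell)) then
        acc ++ [("metadata", i)]
      else acc ++ [("text", i)]

-- analyze_row_pattern, literally: non-empty indices, tagged content types, derived flags
def pyAnalyzeRowPattern (row : List String) : RowPattern :=
  { non_empty_count :=
      ((PySem.List.enumerate row).filter (fun ic => PySem.Str.strip ic.2 != "")).length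
    content_types := (PySem.List.enumerate row).foldl ctStep []
    has_numbers := ((PySem.List.enumerate row).foldl ctStep []).any
      (fun t => t.1 == "number" || t.1 == "integer")
    has_codes := ((PySem.List.enumerate row).foldl ctStep []).any (fun t => t.1 == "code")
    has_metadata := ((PySem.List.enumerate row).foldl ctStep []).any
      (fun t => t.1 == "metadata") }

-- one step of A's grouping loop over the state (row_groups, current_group)
def pyDetectStep (st : List (List (List String)) × List (List String)) (row : List String) :
    List (List (List String)) × List (List String) :=
  if ((pyAnalyzeRowPattern row).has_numbers &&
        decide (3 ≤ (pyAnalyzeRowPattern row).non_empty_count)) ||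
     ((pyAnalyzeRowPattern row).has_codes &&
        decide (2 ≤ (pyAnalyzeRowPattern row).non_empty_count)) then
    (if st.2 != [] then st.1 ++ [st.2] else st.1, [row])
  else
    if st.2 != [] then (st.1, st.2 ++ [row]) else (st.1, [row])

def detect_row_relationships_py (headers : List String) (rows : List (List String)) :
    List (List (List String)) :=
  if rows = [] then []
  else
    if (rows.foldl pyDetectStep ([], [])).2 != [] then
      (rows.foldl pyDetectStep ([], [])).1 ++ [(rows.foldl pyDetectStep ([], [])).2]
    else (rows.foldl pyDetectStep ([], [])).1

-- ===== PORT B =====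
-- is_main: ≥3 non-empty cells with a digit somewhere, or ≥2 with a short digit-free upper-case code
def altIsMain (row : List String) : Bool :=
  if decide (3 ≤ (row.filter (fun c => PySem.Str.strip c != "")).length) &&
      (row.filter (fun c => PySem.Str.strip c != "")).any
        (fun c => c.toList.any PySem.Chars.isdigit) then
    true
  else
    decide (2 ≤ (row.filter (fun c => PySem.Str.strip c != "")).length) &&
      (row.filter (fun c => PySem.Str.strip c != "")).any (fun c =>
        !(c.toList.any PySem.Chars.isdigit) && decide (PySem.Str.len c ≤ 20) &&
        c.toList.any PySem.Chars.isupper)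

-- _group: the first row plus the run of non-main rows forms a group; recurse on the rest
def altGroup (rs : List (List String)) : List (List (List String)) :=
  match rs with
  | [] => []
  | r :: rest =>
    (r :: rest.takeWhile (fun x => !altIsMain x)) ::
      altGroup (rest.dropWhile (fun x => !altIsMain x))
termination_by rs.length
decreasing_by
  simp only [List.length_cons]
  exact Nat.lt_succ_of_le (List.length_dropWhile_le _ _)

def detect_row_relationships_py_alt (headers : List String) (rows : List (List String)) :
    List (List (List String)) :=
  altGroup rows

-- ===== PRECONDITION & SPEC =====
def Spec_detect_row_relationships_py (headers : List String) (rows : List (List String)) (out : List (List (List String))) : Prop := out = detect_row_relationships_py_alt headers rows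
instance (headers : List String) (rows : List (List String)) (out : List (List (List String))) : Decidable (Spec_detect_row_relationships_py headers rows out) := by unfold Spec_detect_row_relationships_py; infer_instance

-- ===== CLAIM =====
def Claim_equal_detect_row_relationships_py : Prop := ∀ (headers : List String) (rows : List (List String)), Dom_detect_row_relationships_py headers rows → Spec_detect_row_relationships_py headers rows (detect_row_relationships_py headers rows)

-- ===== LEMMAS AND PROOFS =====

theorem altGroup_nil : altGroup [] = [] := by rw [altGroup.eq_def]

theorem altGroup_cons (r : List String) (rest : List (List String)) :
    altGroup (r :: rest) =
      (r :: rest.takeWhile (fun x => !altIsMain x)) ::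
        altGroup (rest.dropWhile (fun x => !altIsMain x)) := by
  rw [altGroup.eq_def]

-- the tag(s) ctStep appends for one enumerated cell
def ctTag : Int × String → List (String × Int)
  | (i, cell) =>
    if PySem.Str.strip cell == "" then []
    else
      if cell.toList.any PySem.Chars.isdigit then
        if cell.toList.any (fun ch => ch == '.') then [("number", i)]
        else [("integer", i)]
      else if decide (PySem.Str.len cell ≤ 20) && cell.toList.any PySem.Chars.isupper then
        [("code", i)]
      else if (["origin", "country", "commodity", "export", "cpc"] : List String).any
          (fun phrase => PySem.Str.isIn phrase (PySem.Str.lower cell)) then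
        [("metadata", i)]
      else [("text", i)]

theorem ctStep_eq (acc : List (String × Int)) (ic : Int × String) :
    ctStep acc ic = acc ++ ctTag ic := by
  obtain ⟨i, cell⟩ := ic
  unfold ctStep ctTag
  dsimp only
  split_ifs <;> simp

theorem ctFold_eq_flatMap (l : List (Int × String)) (acc : List (String × Int)) :
    l.foldl ctStep acc = acc ++ l.flatMap ctTag := by
  induction l generalizing acc with
  | nil => simp
  | cons ic t ih =>
    rw [List.foldl_cons, ctStep_eq, ih, List.flatMap_cons, List.append_assoc]

theorem any_ctTag_num (ic : Int × String) :
    (ctTag ic).any (fun t => t.1 == "number" || t.1 == "integer") =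
      ((PySem.Str.strip ic.2 != "") && ic.2.toList.any PySem.Chars.isdigit) := by
  obtain ⟨i, cell⟩ := ic
  unfold ctTag
  dsimp only
  split_ifs <;> simp_all

theorem any_ctTag_code (ic : Int × String) :
    (ctTag ic).any (fun t => t.1 == "code") =
      ((PySem.Str.strip ic.2 != "") && (!(ic.2.toList.any PySem.Chars.isdigit) &&
        decide (PySem.Str.len ic.2 ≤ 20) && ic.2.toList.any PySem.Chars.isupper)) := by
  obtain ⟨i, cell⟩ := ic
  unfold ctTag
  dsimp only
  split_ifs <;> simp_all

theorem enumerate_any_snd {α : Type} (xs : List α) (s : Int) (q : α → Bool) :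
    (PySem.List.enumerate xs s).any (fun ic => q ic.2) = xs.any q := by
  induction xs generalizing s with
  | nil => simp [PySem.List.enumerate_nil]
  | cons x t ih => simp [PySem.List.enumerate_cons, ih]

theorem enumerate_filter_len_snd {α : Type} (xs : List α) (s : Int) (q : α → Bool) :
    ((PySem.List.enumerate xs s).filter (fun ic => q ic.2)).length = (xs.filter q).length := by
  induction xs generalizing s with
  | nil => simp [PySem.List.enumerate_nil]
  | cons x t ih =>
    simp only [PySem.List.enumerate_cons, List.filter_cons]
    by_cases h : q x <;> simp [h, ih]

theorem main_bool_shape (a b c3 c2 : Bool) :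
    ((a && c3) || (b && c2)) = (if c3 && a then true else c2 && b) := by
  cases a <;> cases b <;> cases c3 <;> cases c2 <;> rfl

-- A's "start new group" condition equals B's is-main predicate
theorem cond_eq_altIsMain (row : List String) :
    (((pyAnalyzeRowPattern row).has_numbers &&
        decide (3 ≤ (pyAnalyzeRowPattern row).non_empty_count)) ||
     ((pyAnalyzeRowPattern row).has_codes &&
        decide (2 ≤ (pyAnalyzeRowPattern row).non_empty_count))) = altIsMain row := by
  unfold pyAnalyzeRowPattern altIsMain
  simp only [ctFold_eq_flatMap, List.nil_append, List.any_flatMap, any_ctTag_num, any_ctTag_code,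
    List.any_filter]
  rw [enumerate_any_snd row 0
        (fun c => (PySem.Str.strip c != "") && c.toList.any PySem.Chars.isdigit),
      enumerate_any_snd row 0
        (fun c => (PySem.Str.strip c != "") && (!(c.toList.any PySem.Chars.isdigit) &&
          decide (PySem.Str.len c ≤ 20) && c.toList.any PySem.Chars.isupper)),
      enumerate_filter_len_snd row 0 (fun c => PySem.Str.strip c != "")]
  exact main_bool_shape _ _ _ _

def pyFinish (st : List (List (List String)) × List (List String)) : List (List (List String)) :=
  if st.2 != [] then st.1 ++ [st.2] else st.1

theorem loop_invariant (rs : List (List String)) (gs : List (List (List String)))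
    (cg : List (List String)) (hcg : cg ≠ []) :
    pyFinish (rs.foldl pyDetectStep (gs, cg)) =
      gs ++ (cg ++ rs.takeWhile (fun r => !altIsMain r)) ::
        altGroup (rs.dropWhile (fun r => !altIsMain r)) := by
  induction rs generalizing gs cg with
  | nil => simp [pyFinish, hcg, altGroup_nil]
  | cons r rest ih =>
    have hstep : pyDetectStep (gs, cg) r =
        if altIsMain r then (gs ++ [cg], [r]) else (gs, cg ++ [r]) := by
      unfold pyDetectStep
      rw [cond_eq_altIsMain]
      rcases altIsMain r <;> simp [hcg]
    rw [List.foldl_cons, hstep]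
    rcases h : altIsMain r
    · rw [if_neg (by simp [h]), ih _ _ (by simp [hcg]),
        List.takeWhile_cons_of_pos (by simp [h]), List.dropWhile_cons_of_pos (by simp [h])]
      simp
    · rw [if_pos (by simp [h]), ih _ _ (by simp),
        List.takeWhile_cons_of_neg (by simp [h]), List.dropWhile_cons_of_neg (by simp [h]),
        altGroup_cons]
      simp

-- ===== VERDICT =====
theorem detect_row_relationships_py_spec : Claim_equal_detect_row_relationships_py := by
  intro headers rows _
  unfold Spec_detect_row_relationships_py detect_row_relationships_py detect_row_relationships_py_alt
  cases rows with
  | nil => simp [altGroup_nil]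
  | cons r rest =>
    have hfirst : pyDetectStep ([], []) r = ([], [r]) := by
      unfold pyDetectStep
      split_ifs <;> simp_all
    show pyFinish ((r :: rest).foldl pyDetectStep ([], [])) = _
    rw [List.foldl_cons, hfirst, loop_invariant _ _ _ (by simp), altGroup_cons]
    simp
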